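-- pv_equiv track=rewrite | github.com/SmartDeltaFraunhoferFOKUS/INIMASU | VisualizeRepository/Visualize/VisualizeIssues/VisualizeIssuesHelpFunctions.py | getOverview
-- ===== SOURCE A (Python) =====
-- import math
--
-- def getOverview(interval, body_length, time):
--     overview = {}
--     for i in range(len(body_length)):
--         if time[i] is not None:
--             length = body_length[i]
--             # Determine the key based on the interval
--             key = math.floor(length / interval)
--             if key in overview:
--                 overview[key].append(time[i])
--             else:
--                 overview[key] = [time[i]]
--     # Sort and return the overview
--     return dict(sorted(overview.items()))
-- ===== SOURCE B (Python) =====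
-- def getOverview(interval, body_length, time):
--     pairs = [(length // interval, t) for length, t in zip(body_length, time) if t is not None]
--     keys = sorted({k for k, _ in pairs})
--     return {k: [t for k2, t in pairs if k2 == k] for k in keys}
-- ===== Notes on version B (the rewrite author's own statement) =====
-- stated objective: alternative
-- what changed: A buckets incrementally into a dict (membership test, append-or-create) and then sorts the dict's items; B first collects the flat (bucket, time) pair list via zip, sorts the distinct bucket keys once, and builds each bucket's list by one filter pass per key.
-- outside the precondition, e.g. on getOverview(0, [1], [None]): A returns {}, B returns {}
import Mathlib
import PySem

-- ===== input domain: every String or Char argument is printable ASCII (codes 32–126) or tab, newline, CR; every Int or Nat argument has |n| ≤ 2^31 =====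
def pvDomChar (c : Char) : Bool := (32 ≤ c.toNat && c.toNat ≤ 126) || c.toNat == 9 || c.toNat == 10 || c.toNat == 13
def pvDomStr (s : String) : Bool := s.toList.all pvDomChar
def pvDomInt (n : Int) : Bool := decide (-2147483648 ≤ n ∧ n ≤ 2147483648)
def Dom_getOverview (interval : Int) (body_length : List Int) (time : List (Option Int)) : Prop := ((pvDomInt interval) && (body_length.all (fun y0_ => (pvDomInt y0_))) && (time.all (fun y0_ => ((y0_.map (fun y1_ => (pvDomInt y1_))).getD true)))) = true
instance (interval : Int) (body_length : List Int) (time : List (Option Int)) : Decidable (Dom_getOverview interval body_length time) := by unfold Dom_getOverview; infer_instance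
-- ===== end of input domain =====

-- B replaces A's incremental dict-bucketing-then-sort-items by: collect the (bucket, time) pairs,
-- sort the distinct bucket keys, and build each bucket's list by one filter pass per key ('alternative', not faster).

-- ===== PORT A =====
-- math.floor(length / interval) is ported as PySem.Int.floordiv: on Dom (|ints| ≤ 2^31) the float
-- quotient never rounds across an integer, so floor of the float equals integer floor division.
-- sorted(overview.items()) compares (key, list) tuples; the dict's keys are distinct, so it is
-- exactly a sort by the key — ported as a key-sort on the first component.
def getOverview (interval : Int) (body_length : List Int) (time : List (Option Int)) : List (Int × List Int) :=
  let overview : PySem.Dict Int (List Int) :=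
    (PySem.List.pyRange 0 (PySem.List.len body_length) 1).foldl
      (fun d i =>
        match PySem.List.pyGetD time i none with
        | none => d
        | some t =>
          let length := PySem.List.pyGetD body_length i 0
          let key := PySem.Int.floordiv length interval
          if d.contains key then d.modify key [] (fun l => l ++ [t]) else d.insert key [t])
      PySem.Dict.empty
  PySem.List.sorted overview.items (fun p => p.1) false

-- ===== PORT B =====
def getOverview_alt (interval : Int) (body_length : List Int) (time : List (Option Int)) : List (Int × List Int) :=
  let pairs : List (Int × Int) :=
    (body_length.zip time).filterMap
      (fun q => match q.2 with
        | none => none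
        | some t => some (PySem.Int.floordiv q.1 interval, t))
  let keys := PySem.List.sorted (PySem.Set.ofList (pairs.map (fun p => p.1))) (fun k => k) false
  keys.map (fun k => (k, (pairs.filter (fun q => q.1 == k)).map (fun q => q.2)))

-- ===== PRECONDITION & SPEC =====
-- Pre_ excludes the inputs where Python A raises: interval = 0 (ZeroDivisionError as soon as a
-- non-None time is bucketed) and time shorter than body_length (IndexError). This also excludes
-- the vacuous corner interval = 0 with every in-range time None, where A returns {} (and B does too).
def Pre_getOverview (interval : Int) (body_length : List Int) (time : List (Option Int)) : Prop :=
  interval ≠ 0 ∧ body_length.length ≤ time.length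
instance (interval : Int) (body_length : List Int) (time : List (Option Int)) : Decidable (Pre_getOverview interval body_length time) := by unfold Pre_getOverview; infer_instance
def pvWitness_getOverview : Int × List Int × List (Option Int) := (2, [1, 3, 5], [some 7, none, some 9])

def Spec_getOverview (interval : Int) (body_length : List Int) (time : List (Option Int)) (out : List (Int × List Int)) : Prop := out = getOverview_alt interval body_length time
instance (interval : Int) (body_length : List Int) (time : List (Option Int)) (out : List (Int × List Int)) : Decidable (Spec_getOverview interval body_length time out) := by unfold Spec_getOverview; infer_instance

-- ===== CLAIM (what is proved, stated in full; the proofs are below) =====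
def Claim_equal_getOverview : Prop := ∀ (interval : Int) (body_length : List Int) (time : List (Option Int)), Dom_getOverview interval body_length time → Pre_getOverview interval body_length time → Spec_getOverview interval body_length time (getOverview interval body_length time)

-- ===== LEMMAS AND PROOFS =====

-- modify on an absent key is an insert of f applied to the default
theorem pv_modify_not_contains (d : PySem.Dict Int (List Int)) (k : Int) (f : List Int → List Int)
    (h : d.contains k = false) : d.modify k [] f = d.insert k (f []) := by
  simp [PySem.Dict.modify, PySem.Dict.getD_of_not_contains, h]

-- folding over a filterMap = folding over the source, skipping the dropped elements
theorem pv_foldl_filterMap {α β σ : Type} (g : α → Option β) (s : σ → β → σ) :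
    ∀ (l : List α) (init : σ),
      (l.filterMap g).foldl s init
        = l.foldl (fun acc x => match g x with | none => acc | some y => s acc y) init := by
  intro l
  induction l with
  | nil => intro init; rfl
  | cons x xs ih => intro init; cases hx : g x <;> simp [hx, ih]

-- A's index loop over range(len(body_length)) is the corresponding loop over the zipped lists
theorem pv_range_loop_eq_zip (interval : Int) (body_length : List Int) (time : List (Option Int))
    (hlen : body_length.length ≤ time.length) :
    ∀ (n a : Nat) (init : PySem.Dict Int (List Int)), a + n = body_length.length →
      (PySem.List.pyRange (a : Int) (PySem.List.len body_length) 1).foldl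
        (fun d i =>
          match PySem.List.pyGetD time i none with
          | none => d
          | some t =>
            let length := PySem.List.pyGetD body_length i 0
            let key := PySem.Int.floordiv length interval
            if d.contains key then d.modify key [] (fun l => l ++ [t]) else d.insert key [t])
        init
      = ((body_length.drop a).zip (time.drop a)).foldl
          (fun d q =>
            match q.2 with
            | none => d
            | some t =>
              let key := PySem.Int.floordiv q.1 interval
              if d.contains key then d.modify key [] (fun l => l ++ [t]) else d.insert key [t])
          init := by
  intro n
  induction n with
  | zero =>
    intro a init ha
    rw [PySem.List.pyRange_one_eq_nil (by simp [PySem.List.len_eq]; omega)]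
    rw [List.drop_of_length_le (by omega)]
    simp
  | succ m ih =>
    intro a init ha
    have halt : a < body_length.length := by omega
    have hat : a < time.length := by omega
    rw [PySem.List.pyRange_one_cons (by simp [PySem.List.len_eq]; omega)]
    rw [List.drop_eq_getElem_cons halt, List.drop_eq_getElem_cons hat]
    simp only [List.zip_cons_cons, List.foldl_cons]
    rw [show ((a : Int) + 1) = ((a + 1 : Nat) : Int) by push_cast; ring]
    rw [ih (a + 1) _ (by omega)]
    simp [PySem.List.pyGetD_natCast, List.getElem?_eq_getElem halt, List.getElem?_eq_getElem hat]

theorem getOverview_eq_alt (interval : Int) (body_length : List Int) (time : List (Option Int))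
    (hlen : body_length.length ≤ time.length) :
    getOverview interval body_length time = getOverview_alt interval body_length time := by
  -- the filtered (bucket, time) pair list B works on
  have main :
      PySem.List.sorted
        ((PySem.List.pyRange 0 (PySem.List.len body_length) 1).foldl
          (fun d i =>
            match PySem.List.pyGetD time i none with
            | none => d
            | some t =>
              let length := PySem.List.pyGetD body_length i 0
              let key := PySem.Int.floordiv length interval
              if d.contains key then d.modify key [] (fun l => l ++ [t]) else d.insert key [t])
          PySem.Dict.empty).items (fun p => p.1) false
      = (PySem.List.sorted
          (PySem.Set.ofList
            (((body_length.zip time).filterMap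
              (fun q => match q.2 with
                | none => none
                | some t => some (PySem.Int.floordiv q.1 interval, t))).map (fun p => p.1)))
          (fun k => k) false).map
          (fun k =>
            (k, (((body_length.zip time).filterMap
              (fun q => match q.2 with
                | none => none
                | some t => some (PySem.Int.floordiv q.1 interval, t))).filter
                  (fun q => q.1 == k)).map (fun q => q.2))) := by
    set P : List (Int × Int) :=
      (body_length.zip time).filterMap
        (fun q => match q.2 with
          | none => none
          | some t => some (PySem.Int.floordiv q.1 interval, t)) with hP
    -- 1. the index loop is the loop over the zipped lists
    have h0 := pv_range_loop_eq_zip interval body_length time hlen body_length.length 0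
      PySem.Dict.empty (by omega)
    simp only [Nat.cast_zero, List.drop_zero] at h0
    rw [h0]
    -- 2. the zipped loop skips the None entries: it is the loop over P
    have h1 : (body_length.zip time).foldl
        (fun d q =>
          match q.2 with
          | none => d
          | some t =>
            let key := PySem.Int.floordiv q.1 interval
            if d.contains key then d.modify key [] (fun l => l ++ [t]) else d.insert key [t])
        PySem.Dict.empty
        = P.foldl
            (fun d q => if d.contains q.1 then d.modify q.1 [] (fun l => l ++ [q.2]) else d.insert q.1 [q.2])
            PySem.Dict.empty := by
      rw [hP, pv_foldl_filterMap]
      apply List.foldl_ext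
      intro d q _
      cases q.2 <;> rfl
    rw [h1]
    -- 3. the insert branch IS a modify on an absent key
    have h2 : P.foldl
        (fun d q => if d.contains q.1 then d.modify q.1 [] (fun l => l ++ [q.2]) else d.insert q.1 [q.2])
        PySem.Dict.empty
        = P.foldl (fun d q => d.modify q.1 [] (fun l => l ++ [q.2])) PySem.Dict.empty := by
      apply List.foldl_ext
      intro d q _
      by_cases h : d.contains q.1
      · simp [h]
      · simp only [Bool.not_eq_true] at h
        simp [h, pv_modify_not_contains d q.1 _ h]
    rw [h2]
    set dct := P.foldl (fun d q => d.modify q.1 [] (fun l => l ++ [q.2])) PySem.Dict.empty with hdct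
    -- 4. the loop's dict, as an items list: distinct keys in first-appearance order, grouped times
    have hkeys : dct.keys = PySem.Set.ofList (P.map (fun p => p.1)) := by
      have := PySem.Dict.keys_foldl_modify_key P (fun p => p.1) []
        (fun _ q => (fun l => l ++ [q.2])) PySem.Dict.empty
      simpa [PySem.Dict.keys_empty, PySem.Set.update_nil_left] using this
    have hnd : dct.keys.Nodup :=
      PySem.Dict.nodup_keys_foldl_modify_key P (fun p => p.1) []
        (fun _ q => (fun l => l ++ [q.2])) PySem.Dict.empty (by simp [PySem.Dict.keys_empty])
    have hget : ∀ k, dct.getD k [] = (P.filter (fun q => q.1 == k)).map (fun q => q.2) := by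
      intro k
      have := PySem.Dict.getD_foldl_modify_append P PySem.Dict.empty k
      simpa [PySem.Dict.getD_empty] using this
    have hitems : dct.items = (PySem.Set.ofList (P.map (fun p => p.1))).map
        (fun k => (k, (P.filter (fun q => q.1 == k)).map (fun q => q.2))) := by
      rw [PySem.Dict.items_eq_map_keys dct hnd [], hkeys]
      apply List.map_congr_left
      intro k _
      rw [hget]
    rw [hitems]
    -- 5. key-sorting the per-key items list is mapping over the sorted distinct keys
    apply PySem.List.sorted_eq_of_perm_of_pairwise_lt
    · exact (PySem.List.sorted_perm _ _ _).map _
    · have h := PySem.List.sorted_ofList_pairwise_lt (P.map (fun p => p.1))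
      exact List.Pairwise.map _ (by intro a b hab; simpa using hab) h
  exact main

-- ===== VERDICT (by name: the statement is the Claim_ definition above) =====
theorem getOverview_spec : Claim_equal_getOverview := by
  intro interval body_length time _ hpre
  exact getOverview_eq_alt interval body_length time hpre.2
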